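-- pv_equiv track=rewrite | github.com/manas-17045/LeetcodeSolutions | Leetcode 2201-2300/2281/2281_1.py | totalStrength
-- ===== SOURCE A (Python) =====
-- def totalStrength(strength: list[int]) -> int:
--     """
--     Calculates the total strength of wizards based on their individual strengths.
--
--     The total strength is defined as the sum of (min_val * sum_of_elements) for all possible subarrays.
--     This problem can be efficiently solved using a monotonic stack to find the nearest smaller/greater elements
--     and prefix sums to calculate subarray sums quickly.
--
--     Args:
--         strength: A list of integers representing the strength of each wizard.
--
--     Returns:
--         The total strength of wizards modulo 10^9 + 7.
--     """
--     n = len(strength)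
--     mod = 10**9 + 7
--
--     left = [-1] * n
--     stack = []
--     for i in range(n):
--         while stack and strength[stack[-1]] > strength[i]:
--             stack.pop()
--         if stack:
--             left[i] = stack[-1]
--         stack.append(i)
--
--     right = [n] * n
--     stack = []
--     for i in range(n - 1, -1, -1):
--         while stack and strength[stack[-1]] >= strength[i]:
--             stack.pop()
--         if stack:
--             right[i] = stack[-1]
--         stack.append(i)
--
--     prefixSum = [0] * (n + 1)
--     for i in range(n):
--         prefixSum[i + 1] = (prefixSum[i] + strength[i]) % mod
--
--     prefixOfPrefixSum = [0] * (n + 2)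
--     for i in range(n + 1):
--         prefixOfPrefixSum[i + 1] = (prefixOfPrefixSum[i] + prefixSum[i]) % mod
--
--     totalStrength = 0
--     for i in range(n):
--         leftBound = left[i] + 1
--         rightBound = right[i] - 1
--
--         countLeft = i - leftBound + 1
--         countRight = rightBound - i + 1
--
--         sumPrefixRight = (prefixOfPrefixSum[rightBound + 2] - prefixOfPrefixSum[i + 1] + mod) % mod
--         sumPrefixLeft = (prefixOfPrefixSum[i + 1] - prefixOfPrefixSum[leftBound] + mod) % mod
--
--         positiveTerm = (countLeft * sumPrefixRight) % mod
--         negativeTerm = (countRight * sumPrefixLeft) % mod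
--
--         sumOfSubarraySums = (positiveTerm - negativeTerm + mod) % mod
--
--         term = (strength[i] * sumOfSubarraySums) % mod
--         totalStrength = (totalStrength + term) % mod
--
--     return totalStrength
-- ===== SOURCE B (Python) =====
-- def totalStrength(strength: list[int]) -> int:
--     """Brute-force per-element contribution: for each index i, scan outward for its
--     window (previous <= element strictly excluded on the left, next < element on the
--     right), then sum the sums of all subarrays in which i is the designated minimum
--     directly from an exact (non-modular) prefix-sum list; reduce once at the end."""
--     n = len(strength)
--     mod = 10**9 + 7
--     pre = [0]
--     for x in strength:
--         pre.append(pre[-1] + x)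
--     total = 0
--     for i in range(n):
--         L = i - 1
--         while L >= 0 and strength[L] > strength[i]:
--             L -= 1
--         R = i + 1
--         while R < n and strength[R] >= strength[i]:
--             R += 1
--         s = 0
--         for l in range(L + 1, i + 1):
--             for r in range(i, R):
--                 s += pre[r + 1] - pre[l]
--         total += strength[i] * s
--     return total % mod
-- ===== Notes on version B (the rewrite author's own statement) =====
-- stated objective: alternative
-- what changed: Replaces A's two monotonic-stack boundary passes, modular prefix and prefix-of-prefix arrays and closed-form per-index formula by, for each index, a direct outward scan for the window boundaries and an exact (non-modular) double summation of subarray sums from a single prefix-sum list, reducing mod 1e9+7 once at the end.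
import Mathlib
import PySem

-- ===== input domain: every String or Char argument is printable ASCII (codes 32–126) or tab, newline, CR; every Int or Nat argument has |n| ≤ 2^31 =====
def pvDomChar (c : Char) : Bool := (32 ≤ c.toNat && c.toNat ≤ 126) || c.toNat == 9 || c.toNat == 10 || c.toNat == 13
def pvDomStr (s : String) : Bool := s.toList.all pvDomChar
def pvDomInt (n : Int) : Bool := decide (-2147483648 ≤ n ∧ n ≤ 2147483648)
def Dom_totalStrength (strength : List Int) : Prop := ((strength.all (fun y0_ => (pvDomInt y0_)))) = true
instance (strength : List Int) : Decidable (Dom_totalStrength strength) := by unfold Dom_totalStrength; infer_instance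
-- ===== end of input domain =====

-- B replaces A's two monotonic-stack boundary passes and the modular prefix/prefix-of-prefix
-- closed-form arithmetic by, per index, direct outward scans for the window boundaries and an
-- exact (non-modular) double sum of subarray sums from one prefix list, reduced mod 1e9+7 once
-- at the end; objective: alternative (same result, different algorithmic decomposition).

-- ===== PORT A =====
def pvMod : Int := 1000000007

-- xs[i]: every access in both ports is in range, so the defaulted total form is exact
def pvGetS (xs : List Int) (i : Int) : Int := PySem.List.pyGetD xs i 0

-- `while stack and strength[stack[-1]] > x: stack.pop()`  (top of stack = head)
def pvPopGT (s : List Int) (x : Int) (st : List Int) : List Int :=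
  st.dropWhile (fun j => decide (x < pvGetS s j))

-- `while stack and strength[stack[-1]] >= x: stack.pop()`
def pvPopGE (s : List Int) (x : Int) (st : List Int) : List Int :=
  st.dropWhile (fun j => decide (x ≤ pvGetS s j))

def pvLeftPass (s : List Int) (n : Int) : List Int :=
  ((PySem.List.pyRange 0 n 1).foldl (fun (acc : List Int × List Int) i =>
      let st := pvPopGT s (pvGetS s i) acc.2
      let lf := match st with
        | [] => acc.1
        | j :: _ => PySem.List.pySetD acc.1 i j
      (lf, i :: st))
    (List.replicate n.toNat (-1), [])).1

def pvRightPass (s : List Int) (n : Int) : List Int :=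
  ((PySem.List.pyRange (n - 1) (-1) (-1)).foldl (fun (acc : List Int × List Int) i =>
      let st := pvPopGE s (pvGetS s i) acc.2
      let rt := match st with
        | [] => acc.1
        | j :: _ => PySem.List.pySetD acc.1 i j
      (rt, i :: st))
    (List.replicate n.toNat n, [])).1

def pvPrefixSum (s : List Int) (n : Int) : List Int :=
  (PySem.List.pyRange 0 n 1).foldl (fun ps i =>
      PySem.List.pySetD ps (i + 1) (PySem.Int.mod (pvGetS ps i + pvGetS s i) pvMod))
    (List.replicate (n.toNat + 1) 0)

def pvPops (ps : List Int) (n : Int) : List Int :=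
  (PySem.List.pyRange 0 (n + 1) 1).foldl (fun pp i =>
      PySem.List.pySetD pp (i + 1) (PySem.Int.mod (pvGetS pp i + pvGetS ps i) pvMod))
    (List.replicate (n.toNat + 2) 0)

def totalStrength (strength : List Int) : Int :=
  let n := PySem.List.len strength
  let left := pvLeftPass strength n
  let right := pvRightPass strength n
  let ps := pvPrefixSum strength n
  let pp := pvPops ps n
  (PySem.List.pyRange 0 n 1).foldl (fun total i =>
    let leftBound := pvGetS left i + 1
    let rightBound := pvGetS right i - 1
    let countLeft := i - leftBound + 1
    let countRight := rightBound - i + 1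
    let sumPrefixRight := PySem.Int.mod (pvGetS pp (rightBound + 2) - pvGetS pp (i + 1) + pvMod) pvMod
    let sumPrefixLeft := PySem.Int.mod (pvGetS pp (i + 1) - pvGetS pp leftBound + pvMod) pvMod
    let positiveTerm := PySem.Int.mod (countLeft * sumPrefixRight) pvMod
    let negativeTerm := PySem.Int.mod (countRight * sumPrefixLeft) pvMod
    let sumOfSubarraySums := PySem.Int.mod (positiveTerm - negativeTerm + pvMod) pvMod
    let term := PySem.Int.mod (pvGetS strength i * sumOfSubarraySums) pvMod
    PySem.Int.mod (total + term) pvMod) 0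

-- ===== PORT B =====
-- `L = i - 1; while L >= 0 and strength[L] > strength[i]: L -= 1`  (result = L; called with i)
def pvScanL (s : List Int) (x : Int) : Nat → Int
  | 0 => -1
  | k + 1 => if x < pvGetS s (k : Int) then pvScanL s x k else (k : Int)

-- `R = i + 1; while R < n and strength[R] >= strength[i]: R += 1`
def pvScanR (s : List Int) (x : Int) (n : Nat) (r : Nat) : Int :=
  if r < n then
    if x ≤ pvGetS s (r : Int) then pvScanR s x n (r + 1) else (r : Int)
  else (r : Int)
termination_by n - r

-- `pre = [0]; for x in strength: pre.append(pre[-1] + x)`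
def pvPre (s : List Int) : List Int :=
  s.foldl (fun acc x => acc ++ [PySem.List.pyGetD acc (-1) 0 + x]) [0]

def totalStrength_alt (strength : List Int) : Int :=
  let n := strength.length
  let pre := pvPre strength
  let total := (PySem.List.pyRange 0 (n : Int) 1).foldl (fun total i =>
    let L := pvScanL strength (pvGetS strength i) i.toNat
    let R := pvScanR strength (pvGetS strength i) n (i.toNat + 1)
    let sres := (PySem.List.pyRange (L + 1) (i + 1) 1).foldl (fun acc l =>
        (PySem.List.pyRange i R 1).foldl (fun acc2 r =>
            acc2 + (pvGetS pre (r + 1) - pvGetS pre l)) acc) 0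
    total + pvGetS strength i * sres) 0
  PySem.Int.mod total pvMod

-- ===== PRECONDITION & SPEC =====
def Spec_totalStrength (strength : List Int) (out : Int) : Prop := out = totalStrength_alt strength
instance (strength : List Int) (out : Int) : Decidable (Spec_totalStrength strength out) := by unfold Spec_totalStrength; infer_instance

-- ===== CLAIM (what is proved, stated in full; the proofs are below) =====
def Claim_equal_totalStrength : Prop := ∀ (strength : List Int), Dom_totalStrength strength → Spec_totalStrength strength (totalStrength strength)

-- ===== LEMMAS AND PROOFS =====

def pvV (s : List Int) (k : Nat) : Int := s.getD k 0

theorem pvGetS_natCast (s : List Int) (k : Nat) : pvGetS s (k : Int) = pvV s k := by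
  simp [pvGetS, pvV]

def IsPrevLE (s : List Int) (x : Int) (m : Nat) (r : Int) : Prop :=
  -1 ≤ r ∧ r < (m : Int) ∧ (∀ k : Nat, r < (k : Int) → k < m → x < pvV s k) ∧
    (0 ≤ r → pvV s r.toNat ≤ x)

theorem pvDropWhile_eq_filter {α : Type} (c : α → Bool) :
    ∀ l : List α, l.Pairwise (fun a b => c b = true → c a = true) →
      l.dropWhile c = l.filter (fun a => !c a) := by
  intro l
  induction l with
  | nil => intro _; rfl
  | cons a t ih =>
    intro hp
    rw [List.pairwise_cons] at hp
    by_cases h : c a = true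
    · rw [List.dropWhile_cons_of_pos h, List.filter_cons_of_neg (by simp [h]), ih hp.2]
    · rw [List.dropWhile_cons_of_neg (by simp [h]), List.filter_cons_of_pos (by simp [h])]
      have : t.filter (fun a => !c a) = t := by
        rw [List.filter_eq_self]
        intro b hb
        simp only [Bool.not_eq_true']
        by_contra hcb
        exact h (hp.1 b hb (by simpa using hcb))
      rw [this]

theorem pvFilter_head_max (q : Int → Bool) :
    ∀ l : List Int, l.Pairwise (· > ·) →
      (l.filter q = [] ∧ ∀ j ∈ l, q j = false) ∨
      (∃ j0 t, l.filter q = j0 :: t ∧ j0 ∈ l ∧ q j0 = true ∧ ∀ j ∈ l, q j = true → j ≤ j0) := by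
  intro l
  induction l with
  | nil => intro _; left; exact ⟨rfl, by simp⟩
  | cons a t ih =>
    intro hp
    rw [List.pairwise_cons] at hp
    by_cases h : q a = true
    · right
      exact ⟨a, t.filter q, by rw [List.filter_cons_of_pos h], by simp, h,
        fun j hj _ => by rcases List.mem_cons.mp hj with h' | h'
                         · omega
                         · exact le_of_lt (hp.1 j h')⟩
    · rcases ih hp.2 with ⟨he, hall⟩ | ⟨j0, t0, hf, hmem, hq, hmax⟩
      · left
        refine ⟨by rw [List.filter_cons_of_neg (by simp [h]), he], ?_⟩
        intro j hj
        rcases List.mem_cons.mp hj with h' | h'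
        · subst h'; simpa using h
        · exact hall j h'
      · right
        refine ⟨j0, t0, by rw [List.filter_cons_of_neg (by simp [h]), hf], List.mem_cons_of_mem _ hmem, hq, ?_⟩
        intro j hj hqj
        rcases List.mem_cons.mp hj with h' | h'
        · subst h'; simp [h] at hqj
        · exact hmax j h' hqj

def pvKeepL (s : List Int) (m j : Nat) : Bool :=
  (List.range m).all (fun k => !(decide (j < k)) || decide (pvV s j ≤ pvV s k))

theorem pvKeepL_iff (s : List Int) (m j : Nat) :
    pvKeepL s m j = true ↔ ∀ k, j < k → k < m → pvV s j ≤ pvV s k := by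
  simp only [pvKeepL, List.all_eq_true, List.mem_range, Bool.or_eq_true, Bool.not_eq_true',
    decide_eq_false_iff_not, decide_eq_true_eq]
  constructor
  · intro h k hk1 hk2; rcases h k hk2 with h' | h' <;> [omega; exact h']
  · intro h k hk2; by_cases hj : j < k
    · exact Or.inr (h k hj hk2)
    · exact Or.inl hj

def pvStkL (s : List Int) (m : Nat) : List Int :=
  List.map (fun j => Int.ofNat j) (((List.range m).filter (pvKeepL s m)).reverse)

theorem pvMem_stkL (s : List Int) (m : Nat) (a : Int) :
    a ∈ pvStkL s m ↔ ∃ j : Nat, a = (j : Int) ∧ j < m ∧ pvKeepL s m j = true := by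
  rw [pvStkL, List.mem_map]
  simp only [List.mem_reverse, List.mem_filter, List.mem_range]
  constructor
  · rintro ⟨j, ⟨hj, hk⟩, rfl⟩; exact ⟨j, rfl, hj, hk⟩
  · rintro ⟨j, rfl, hj, hk⟩; exact ⟨j, ⟨hj, hk⟩, rfl⟩

theorem pvStkL_pairwise_gt (s : List Int) (m : Nat) : (pvStkL s m).Pairwise (· > ·) := by
  rw [pvStkL, List.pairwise_map, List.pairwise_reverse]
  refine List.Pairwise.imp ?_ (List.Pairwise.filter _ (List.pairwise_lt_range))
  intro a b h
  simp only [Int.ofNat_eq_natCast, gt_iff_lt]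
  exact_mod_cast h

theorem pvStkL_pairwise_val (s : List Int) (m : Nat) :
    (pvStkL s m).Pairwise (fun a b => pvV s b.toNat ≤ pvV s a.toNat) := by
  refine List.Pairwise.imp_of_mem ?_ (pvStkL_pairwise_gt s m)
  intro a b ha hb hab
  rw [pvMem_stkL] at ha hb
  obtain ⟨ja, rfl, hja, hka⟩ := ha
  obtain ⟨jb, rfl, hjb, hkb⟩ := hb
  rw [Int.toNat_natCast, Int.toNat_natCast]
  exact (pvKeepL_iff s m jb).mp hkb ja (by exact_mod_cast hab) hja

theorem pvPopGT_stkL (s : List Int) (x : Int) (m : Nat) :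
    (pvStkL s m).dropWhile (fun j => decide (x < pvGetS s j)) =
      (pvStkL s m).filter (fun j => !decide (x < pvGetS s j)) := by
  apply pvDropWhile_eq_filter
  refine List.Pairwise.imp_of_mem ?_ (pvStkL_pairwise_val s m)
  intro a b ha hb hab hx
  rw [pvMem_stkL] at ha hb
  obtain ⟨ja, rfl, hja, _⟩ := ha
  obtain ⟨jb, rfl, hjb, _⟩ := hb
  rw [pvGetS_natCast] at hx ⊢
  rw [Int.toNat_natCast, Int.toNat_natCast] at hab
  simp only [decide_eq_true_eq] at hx ⊢
  omega

theorem pvExists_kept (s : List Int) (x : Int) (m : Nat) (k0 : Nat) (hk0 : k0 < m)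
    (hv : pvV s k0 ≤ x) :
    ∃ k1, k1 < m ∧ pvV s k1 ≤ x ∧ pvKeepL s m k1 = true ∧ k0 ≤ k1 := by
  classical
  set P : Nat → Prop := fun k => pvV s k ≤ x with hP
  have hk0' : k0 ≤ m - 1 := by omega
  have hv' : P k0 := hv
  have hspec : P (Nat.findGreatest P (m - 1)) := Nat.findGreatest_spec hk0' hv'
  refine ⟨Nat.findGreatest P (m - 1), by have := Nat.findGreatest_le (P := P) (m - 1); omega,
    hspec, ?_, Nat.le_findGreatest hk0' hv'⟩
  rw [pvKeepL_iff]
  intro k hk1 hk2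
  have hnk : ¬ P k := Nat.findGreatest_is_greatest hk1 (by omega)
  have hG : P (Nat.findGreatest P (m - 1)) := Nat.findGreatest_spec hk0' hv
  simp only [hP] at hnk hG
  omega

theorem pvStkL_filter_head (s : List Int) (x : Int) (m : Nat) :
    IsPrevLE s x m (match (pvStkL s m).filter (fun j => !decide (x < pvGetS s j)) with
      | [] => -1 | j :: _ => j) := by
  rcases pvFilter_head_max (fun j => !decide (x < pvGetS s j)) (pvStkL s m)
      (pvStkL_pairwise_gt s m) with ⟨he, hall⟩ | ⟨j0, t, hf, hmem, hq, hmax⟩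
  · rw [he]
    show IsPrevLE s x m (-1)
    refine ⟨le_refl _, by omega, ?_, by omega⟩
    intro k hk1 hk2
    by_contra hnot
    obtain ⟨k1, hk1m, hk1v, hk1k, _⟩ := pvExists_kept s x m k (by omega) (by omega)
    have hmem1 : (k1 : Int) ∈ pvStkL s m := (pvMem_stkL s m _).mpr ⟨k1, rfl, hk1m, hk1k⟩
    have := hall _ hmem1
    rw [pvGetS_natCast] at this
    simp only [Bool.not_eq_false', decide_eq_true_eq] at this
    omega
  · rw [hf]
    show IsPrevLE s x m j0
    obtain ⟨j0n, rfl, hj0m, hj0k⟩ := (pvMem_stkL s m _).mp hmem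
    rw [pvGetS_natCast] at hq
    simp only [Bool.not_eq_true', decide_eq_false_iff_not] at hq
    refine ⟨by omega, by omega, ?_, ?_⟩
    · intro k hk1 hk2
      by_contra hnot
      obtain ⟨k1, hk1m, hk1v, hk1k, hk1ge⟩ := pvExists_kept s x m k (by omega) (by omega)
      have hmem1 : (k1 : Int) ∈ pvStkL s m := (pvMem_stkL s m _).mpr ⟨k1, rfl, hk1m, hk1k⟩
      have := hmax _ hmem1 (by rw [pvGetS_natCast]; simp only [Bool.not_eq_true',
        decide_eq_false_iff_not]; omega)
      omega
    · intro _; rw [Int.toNat_natCast]; omega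

theorem scanL_isPrevLE (s : List Int) (x : Int) : ∀ m, IsPrevLE s x m (pvScanL s x m) := by
  intro m
  induction m with
  | zero =>
    refine ⟨le_refl _, by simp [pvScanL], ?_, ?_⟩
    · intro k hk hk2; omega
    · intro h; simp [pvScanL] at h
  | succ m ih =>
    rw [pvScanL]
    by_cases h : x < pvGetS s (m : Int)
    · rw [if_pos h]
      obtain ⟨h1, h2, h3, h4⟩ := ih
      refine ⟨h1, by omega, ?_, h4⟩
      intro k hk hkm
      rcases Nat.lt_succ_iff_lt_or_eq.mp hkm with h' | h'
      · exact h3 k hk h'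
      · subst h'; rw [← pvGetS_natCast]; exact h
    · rw [if_neg h]
      refine ⟨by omega, by omega, ?_, ?_⟩
      · intro k hk hkm; omega
      · intro _; rw [Int.toNat_natCast, ← pvGetS_natCast]; omega

theorem isPrevLE_unique (s : List Int) (x : Int) (m : Nat) (a b : Int)
    (ha : IsPrevLE s x m a) (hb : IsPrevLE s x m b) : a = b := by
  obtain ⟨ha1, ha2, ha3, ha4⟩ := ha
  obtain ⟨hb1, hb2, hb3, hb4⟩ := hb
  by_contra hne
  rcases lt_trichotomy a b with h | h | h
  · have hb0 : 0 ≤ b := by omega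
    have := ha3 b.toNat (by omega) (by omega)
    have := hb4 hb0
    omega
  · exact hne h
  · have ha0 : 0 ≤ a := by omega
    have := hb3 a.toNat (by omega) (by omega)
    have := ha4 ha0
    omega

theorem pvScanL_eq_head (s : List Int) (x : Int) (m : Nat) :
    pvScanL s x m = (match (pvStkL s m).filter (fun j => !decide (x < pvGetS s j)) with
      | [] => -1 | j :: _ => j) :=
  isPrevLE_unique s x m _ _ (scanL_isPrevLE s x m) (pvStkL_filter_head s x m)

theorem pvKeepL_succ_self (s : List Int) (m : Nat) : pvKeepL s (m + 1) m = true := by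
  rw [pvKeepL_iff]; intro k h1 h2; omega

theorem pvStkL_succ (s : List Int) (m : Nat) :
    pvStkL s (m + 1) = (m : Int) :: (pvStkL s m).filter (fun j => !decide (pvV s m < pvGetS s j)) := by
  rw [pvStkL, List.range_succ, List.filter_append, List.filter_cons, List.filter_nil]
  rw [if_pos (pvKeepL_succ_self s m), List.reverse_append, List.reverse_cons, List.reverse_nil,
    List.nil_append, List.singleton_append, List.map_cons]
  have h1 : (List.range m).filter (pvKeepL s (m + 1)) =
      ((List.range m).filter (pvKeepL s m)).filter (fun j => !decide (pvV s m < pvV s j)) := by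
    rw [List.filter_filter]
    apply List.filter_congr
    intro j hj
    rw [List.mem_range] at hj
    have hiff : pvKeepL s (m + 1) j = true ↔
        ((!decide (pvV s m < pvV s j)) && pvKeepL s m j) = true := by
      rw [Bool.and_eq_true, pvKeepL_iff, pvKeepL_iff]
      simp only [Bool.not_eq_true', decide_eq_false_iff_not, not_lt]
      constructor
      · intro h; exact ⟨h m hj (by omega), fun k h1 h2 => h k h1 (by omega)⟩
      · rintro ⟨hm, h⟩ k h1 h2
        rcases Nat.lt_succ_iff_lt_or_eq.mp h2 with h' | h'
        · exact h k h1 h'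
        · subst h'; exact hm
    exact Bool.coe_iff_coe.mp (by rw [hiff])
  rw [h1]
  have h2 : ∀ l : List Nat, List.map (fun j => Int.ofNat j)
        (List.filter (fun j => !decide (pvV s m < pvV s j)) l)
      = List.filter (fun j => !decide (pvV s m < pvGetS s j)) (List.map (fun j => Int.ofNat j) l) := by
    intro l
    rw [List.filter_map]
    congr 1
    apply List.filter_congr
    intro j _
    simp only [Function.comp_apply, Int.ofNat_eq_natCast, pvGetS_natCast]
  rw [← List.filter_reverse, h2, pvStkL]
  simp only [Int.ofNat_eq_natCast]

theorem pvV_map_range (g : Nat → Int) (L i : Nat) (hi : i < L) :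
    pvV ((List.range L).map g) i = g i := by
  rw [pvV, List.getD_eq_getElem _ _ (by simpa using hi), List.getElem_map, List.getElem_range]

theorem pvSet_map_range (g : Nat → Int) (L m : Nat) (x : Int) :
    ((List.range L).map g).set m x = (List.range L).map (fun k => if k = m then x else g k) := by
  apply List.ext_getElem
  · simp
  · intro i h1 h2
    rw [List.getElem_set]
    simp only [List.getElem_map, List.getElem_range]
    split_ifs with h h' h'
    · rfl
    · omega
    · omega
    · rfl

theorem pvReplicate_eq_map (L : Nat) (x : Int) :
    List.replicate L x = (List.range L).map (fun _ => x) := by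
  induction L with
  | zero => rfl
  | succ L ih => rw [List.replicate_succ', List.range_succ, List.map_append, ← ih]; rfl

def lfmL (s : List Int) (m : Nat) : List Int :=
  (List.range s.length).map (fun i => if i < m then pvScanL s (pvV s i) i else -1)

theorem pvLeftPass_inv (s : List Int) : ∀ m, m ≤ s.length →
    ((PySem.List.pyRange 0 (m : Int) 1).foldl (fun (acc : List Int × List Int) i =>
        let st := pvPopGT s (pvGetS s i) acc.2
        let lf := match st with
          | [] => acc.1
          | j :: _ => PySem.List.pySetD acc.1 i j
        (lf, i :: st))
      (List.replicate s.length (-1), ([] : List Int))) = (lfmL s m, pvStkL s m) := by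
  intro m
  induction m with
  | zero =>
    intro _
    rw [PySem.List.pyRange_one_eq_nil (by norm_num), List.foldl_nil]
    rw [lfmL, pvStkL, pvReplicate_eq_map]
    simp [List.range_zero]
  | succ m ih =>
    intro hm
    have h1 : ((m + 1 : Nat) : Int) = (m : Int) + 1 := by push_cast; ring
    rw [h1, PySem.List.pyRange_one_succ_right (by positivity), List.foldl_append,
      ih (by omega), List.foldl_cons, List.foldl_nil]
    have hpop : pvPopGT s (pvGetS s (m : Int)) (pvStkL s m) =
        (pvStkL s m).filter (fun j => !decide (pvV s m < pvGetS s j)) := by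
      rw [pvGetS_natCast, pvPopGT]; exact pvPopGT_stkL s (pvV s m) m
    dsimp only
    rw [hpop]
    have hscan := pvScanL_eq_head s (pvV s m) m
    rcases hq : (pvStkL s m).filter (fun j => !decide (pvV s m < pvGetS s j)) with _ | ⟨j, t⟩
    · rw [hq] at hscan
      simp only [Prod.mk.injEq]
      constructor
      · rw [lfmL, lfmL]
        apply List.map_congr_left
        intro i hil
        by_cases h : i = m
        · subst h; rw [if_neg (by omega), if_pos (by omega)]; exact hscan.symm
        · by_cases h2 : i < m
          · rw [if_pos h2, if_pos (by omega)]
          · rw [if_neg h2, if_neg (by omega)]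
      · rw [pvStkL_succ, hq]
    · rw [hq] at hscan
      simp only [Prod.mk.injEq]
      constructor
      · rw [PySem.List.pySetD_natCast, lfmL, lfmL, pvSet_map_range]
        apply List.map_congr_left
        intro i hil
        by_cases h : i = m
        · subst h; rw [if_pos rfl, if_pos (by omega)]; exact hscan.symm
        · rw [if_neg h]
          by_cases h2 : i < m
          · rw [if_pos h2, if_pos (by omega)]
          · rw [if_neg h2, if_neg (by omega)]
      · rw [pvStkL_succ, hq]

theorem pvLeftPass_getD (s : List Int) (i : Nat) (hi : i < s.length) :
    pvGetS (pvLeftPass s (PySem.List.len s)) (i : Int) = pvScanL s (pvV s i) i := by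
  rw [pvLeftPass]
  simp only [PySem.List.len_eq, Int.toNat_natCast]
  rw [pvLeftPass_inv s s.length (le_refl _)]
  rw [pvGetS_natCast, lfmL, pvV_map_range _ _ _ hi, if_pos hi]

def IsNextLT (s : List Int) (x : Int) (i n : Nat) (r : Int) : Prop :=
  (i : Int) < r ∧ r ≤ (n : Int) ∧ (∀ k : Nat, (i : Int) < (k : Int) → (k : Int) < r → x ≤ pvV s k) ∧
    (r < (n : Int) → pvV s r.toNat < x)

theorem scanR_isNextLT_aux (s : List Int) (x : Int) (i n : Nat) :
    ∀ f r0, n - r0 = f → i < r0 → r0 ≤ n → (∀ k : Nat, i < k → k < r0 → x ≤ pvV s k) →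
      IsNextLT s x i n (pvScanR s x n r0) := by
  intro f
  induction f with
  | zero =>
    intro r0 hf hi hn hall
    have hr0 : r0 = n := by omega
    rw [pvScanR, if_neg (by omega)]
    exact ⟨by omega, by omega, fun k hk1 hk2 => hall k (by omega) (by omega), by omega⟩
  | succ f ih =>
    intro r0 hf hi hn hall
    have hlt : r0 < n := by omega
    rw [pvScanR, if_pos hlt]
    by_cases h : x ≤ pvGetS s (r0 : Int)
    · rw [if_pos h]
      refine ih (r0 + 1) (by omega) (by omega) (by omega) ?_
      intro k hk1 hk2
      rcases Nat.lt_succ_iff_lt_or_eq.mp hk2 with h' | h'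
      · exact hall k hk1 h'
      · subst h'; rw [← pvGetS_natCast]; exact h
    · rw [if_neg h]
      refine ⟨by omega, by omega, fun k hk1 hk2 => hall k (by omega) (by omega), ?_⟩
      intro _; rw [Int.toNat_natCast, ← pvGetS_natCast]; omega

theorem scanR_isNextLT (s : List Int) (x : Int) (i n : Nat) (hi : i < n) :
    IsNextLT s x i n (pvScanR s x n (i + 1)) :=
  scanR_isNextLT_aux s x i n (n - (i + 1)) (i + 1) rfl (by omega) (by omega) (by omega)

theorem isNextLT_unique (s : List Int) (x : Int) (i n : Nat) (a b : Int)
    (ha : IsNextLT s x i n a) (hb : IsNextLT s x i n b) : a = b := by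
  obtain ⟨ha1, ha2, ha3, ha4⟩ := ha
  obtain ⟨hb1, hb2, hb3, hb4⟩ := hb
  by_contra hne
  rcases lt_trichotomy a b with h | h | h
  · have := hb3 a.toNat (by omega) (by omega)
    have := ha4 (by omega)
    omega
  · exact hne h
  · have := ha3 b.toNat (by omega) (by omega)
    have := hb4 (by omega)
    omega

def pvKeepR (s : List Int) (m j : Nat) : Bool :=
  decide (m ≤ j) && (List.range j).all (fun k => !(decide (m ≤ k)) || decide (pvV s j < pvV s k))

theorem pvKeepR_iff (s : List Int) (m j : Nat) :
    pvKeepR s m j = true ↔ m ≤ j ∧ ∀ k, m ≤ k → k < j → pvV s j < pvV s k := by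
  simp only [pvKeepR, Bool.and_eq_true, decide_eq_true_eq, List.all_eq_true, List.mem_range,
    Bool.or_eq_true, Bool.not_eq_true', decide_eq_false_iff_not]
  constructor
  · rintro ⟨hm, h⟩
    refine ⟨hm, ?_⟩
    intro k hk1 hk2; rcases h k hk2 with h' | h' <;> [omega; exact h']
  · rintro ⟨hm, h⟩
    refine ⟨hm, ?_⟩
    intro k hk2; by_cases hj : m ≤ k
    · exact Or.inr (h k hj hk2)
    · exact Or.inl hj

def pvStkR (s : List Int) (n m : Nat) : List Int :=
  List.map (fun j => Int.ofNat j) ((List.range n).filter (pvKeepR s m))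

theorem pvMem_stkR (s : List Int) (n m : Nat) (a : Int) :
    a ∈ pvStkR s n m ↔ ∃ j : Nat, a = (j : Int) ∧ j < n ∧ pvKeepR s m j = true := by
  rw [pvStkR, List.mem_map]
  simp only [List.mem_filter, List.mem_range]
  constructor
  · rintro ⟨j, ⟨hj, hk⟩, rfl⟩; exact ⟨j, rfl, hj, hk⟩
  · rintro ⟨j, rfl, hj, hk⟩; exact ⟨j, ⟨hj, hk⟩, rfl⟩

theorem pvStkR_pairwise_lt (s : List Int) (n m : Nat) : (pvStkR s n m).Pairwise (· < ·) := by
  rw [pvStkR, List.pairwise_map]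
  refine List.Pairwise.imp ?_ (List.Pairwise.filter _ (List.pairwise_lt_range))
  intro a b h
  simp only [Int.ofNat_eq_natCast]
  exact_mod_cast h

theorem pvPopGE_stkR (s : List Int) (x : Int) (n m : Nat) :
    (pvStkR s n m).dropWhile (fun j => decide (x ≤ pvGetS s j)) =
      (pvStkR s n m).filter (fun j => !decide (x ≤ pvGetS s j)) := by
  apply pvDropWhile_eq_filter
  have hval : (pvStkR s n m).Pairwise (fun a b => pvV s b.toNat < pvV s a.toNat) := by
    refine List.Pairwise.imp_of_mem ?_ (pvStkR_pairwise_lt s n m)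
    intro a b ha hb hab
    rw [pvMem_stkR] at ha hb
    obtain ⟨ja, rfl, hja, hka⟩ := ha
    obtain ⟨jb, rfl, hjb, hkb⟩ := hb
    rw [Int.toNat_natCast, Int.toNat_natCast]
    exact ((pvKeepR_iff s m jb).mp hkb).2 ja ((pvKeepR_iff s m ja).mp hka).1 (by exact_mod_cast hab)
  refine List.Pairwise.imp_of_mem ?_ hval
  intro a b ha hb hab hx
  rw [pvMem_stkR] at ha hb
  obtain ⟨ja, rfl, hja, _⟩ := ha
  obtain ⟨jb, rfl, hjb, _⟩ := hb
  rw [pvGetS_natCast] at hx ⊢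
  rw [Int.toNat_natCast, Int.toNat_natCast] at hab
  simp only [decide_eq_true_eq] at hx ⊢
  omega

theorem pvFilter_head_min (q : Int → Bool) :
    ∀ l : List Int, l.Pairwise (· < ·) →
      (l.filter q = [] ∧ ∀ j ∈ l, q j = false) ∨
      (∃ j0 t, l.filter q = j0 :: t ∧ j0 ∈ l ∧ q j0 = true ∧ ∀ j ∈ l, q j = true → j0 ≤ j) := by
  intro l
  induction l with
  | nil => intro _; left; exact ⟨rfl, by simp⟩
  | cons a t ih =>
    intro hp
    rw [List.pairwise_cons] at hp
    by_cases h : q a = true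
    · right
      exact ⟨a, t.filter q, by rw [List.filter_cons_of_pos h], by simp, h,
        fun j hj _ => by rcases List.mem_cons.mp hj with h' | h'
                         · omega
                         · exact le_of_lt (hp.1 j h')⟩
    · rcases ih hp.2 with ⟨he, hall⟩ | ⟨j0, t0, hf, hmem, hq, hmin⟩
      · left
        refine ⟨by rw [List.filter_cons_of_neg (by simp [h]), he], ?_⟩
        intro j hj
        rcases List.mem_cons.mp hj with h' | h'
        · subst h'; simpa using h
        · exact hall j h'
      · right
        refine ⟨j0, t0, by rw [List.filter_cons_of_neg (by simp [h]), hf], List.mem_cons_of_mem _ hmem, hq, ?_⟩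
        intro j hj hqj
        rcases List.mem_cons.mp hj with h' | h'
        · subst h'; simp [h] at hqj
        · exact hmin j h' hqj

theorem pvExists_keptR (s : List Int) (x : Int) (n m k0 : Nat) (h1 : m < k0) (h2 : k0 < n)
    (hv : pvV s k0 < x) :
    ∃ k1, m < k1 ∧ k1 < n ∧ pvV s k1 < x ∧ pvKeepR s (m + 1) k1 = true ∧ k1 ≤ k0 := by
  classical
  have hex : ∃ k, m < k ∧ pvV s k < x := ⟨k0, h1, hv⟩
  have hle : Nat.find hex ≤ k0 := Nat.find_min' hex ⟨h1, hv⟩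
  obtain ⟨hf1, hf2⟩ := Nat.find_spec hex
  refine ⟨Nat.find hex, hf1, by omega, hf2, ?_, hle⟩
  rw [pvKeepR_iff]
  refine ⟨by omega, ?_⟩
  intro k hk1 hk2
  have := Nat.find_min hex (m := k) (by omega)
  simp only [not_and, not_lt] at this
  have := this (by omega)
  omega

theorem pvStkR_filter_head (s : List Int) (x : Int) (n m : Nat) (hmn : m < n) :
    IsNextLT s x m n (match (pvStkR s n (m + 1)).filter (fun j => !decide (x ≤ pvGetS s j)) with
      | [] => (n : Int) | j :: _ => j) := by
  rcases pvFilter_head_min (fun j => !decide (x ≤ pvGetS s j)) (pvStkR s n (m + 1))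
      (pvStkR_pairwise_lt s n (m + 1)) with ⟨he, hall⟩ | ⟨j0, t, hf, hmem, hq, hmin⟩
  · rw [he]
    show IsNextLT s x m n (n : Int)
    refine ⟨by omega, le_refl _, ?_, by omega⟩
    intro k hk1 hk2
    by_contra hnot
    obtain ⟨k1, ha, hb, hc, hd, _⟩ := pvExists_keptR s x n m k (by omega) (by omega) (by omega)
    have hmem1 : (k1 : Int) ∈ pvStkR s n (m + 1) := (pvMem_stkR s n (m + 1) _).mpr ⟨k1, rfl, hb, hd⟩
    have := hall _ hmem1
    rw [pvGetS_natCast] at this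
    simp only [Bool.not_eq_false', decide_eq_true_eq] at this
    omega
  · rw [hf]
    show IsNextLT s x m n j0
    obtain ⟨j0n, rfl, hj0n, hj0k⟩ := (pvMem_stkR s n (m + 1) _).mp hmem
    rw [pvGetS_natCast] at hq
    simp only [Bool.not_eq_true', decide_eq_false_iff_not, not_le] at hq
    have hj0m : m + 1 ≤ j0n := ((pvKeepR_iff s (m + 1) j0n).mp hj0k).1
    refine ⟨by omega, by omega, ?_, ?_⟩
    · intro k hk1 hk2
      by_contra hnot
      obtain ⟨k1, ha, hb, hc, hd, he⟩ := pvExists_keptR s x n m k (by omega) (by omega) (by omega)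
      have hmem1 : (k1 : Int) ∈ pvStkR s n (m + 1) := (pvMem_stkR s n (m + 1) _).mpr ⟨k1, rfl, hb, hd⟩
      have := hmin _ hmem1 (by rw [pvGetS_natCast]; simp only [Bool.not_eq_true',
        decide_eq_false_iff_not, not_le]; omega)
      omega
    · intro _; rw [Int.toNat_natCast]; omega

theorem pvStkR_succ (s : List Int) (n m : Nat) (hmn : m < n) :
    pvStkR s n m = (m : Int) :: (pvStkR s n (m + 1)).filter (fun j => !decide (pvV s m ≤ pvGetS s j)) := by
  have hq : (pvStkR s n (m + 1)).filter (fun j => !decide (pvV s m ≤ pvGetS s j))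
      = List.map (fun j => Int.ofNat j)
          ((List.range n).filter (fun j => pvKeepR s (m + 1) j && !decide (pvV s m ≤ pvV s j))) := by
    rw [pvStkR, List.filter_map, List.filter_filter]
    congr 1
    apply List.filter_congr
    intro j _
    simp only [Function.comp_apply, Int.ofNat_eq_natCast, pvGetS_natCast]
    exact Bool.and_comm _ _
  rw [hq, pvStkR]
  have hsplit : List.range n = (List.range m ++ [m]) ++ List.map (fun k => (m + 1) + k) (List.range (n - (m + 1))) := by
    rw [← List.range_succ, ← List.range_add]
    congr 1
    omega
  have hkm : pvKeepR s m m = true := by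
    rw [pvKeepR_iff]; exact ⟨le_refl _, fun k h1 h2 => by omega⟩
  have hlow1 : (List.range m).filter (pvKeepR s m) = [] := by
    rw [List.filter_eq_nil_iff]
    intro j hj
    rw [List.mem_range] at hj
    rw [pvKeepR_iff]
    intro ⟨h, _⟩; omega
  have hlow2 : (List.range m ++ [m]).filter (fun j => pvKeepR s (m + 1) j && !decide (pvV s m ≤ pvV s j)) = [] := by
    rw [List.filter_eq_nil_iff]
    intro j hj
    simp only [List.mem_append, List.mem_range, List.mem_singleton] at hj
    simp only [Bool.and_eq_true, Bool.not_eq_true', decide_eq_false_iff_not, not_le]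
    rintro ⟨hk, _⟩
    have := ((pvKeepR_iff s (m + 1) j).mp hk).1
    omega
  rw [hsplit, List.filter_append, List.filter_append, List.filter_append, hlow1, hlow2,
    List.filter_cons, if_pos hkm, List.filter_nil, List.nil_append, List.nil_append]
  have hcongr : (List.map (fun k => (m + 1) + k) (List.range (n - (m + 1)))).filter (pvKeepR s m)
      = (List.map (fun k => (m + 1) + k) (List.range (n - (m + 1)))).filter
          (fun j => pvKeepR s (m + 1) j && !decide (pvV s m ≤ pvV s j)) := by
    apply List.filter_congr
    intro j hj
    obtain ⟨k, _, rfl⟩ := List.mem_map.mp hj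
    have hge : m + 1 ≤ m + 1 + k := by omega
    have hiff : pvKeepR s m (m + 1 + k) = true ↔
        (pvKeepR s (m + 1) (m + 1 + k) && !decide (pvV s m ≤ pvV s (m + 1 + k))) = true := by
      rw [Bool.and_eq_true, pvKeepR_iff, pvKeepR_iff]
      simp only [Bool.not_eq_true', decide_eq_false_iff_not, not_le]
      constructor
      · rintro ⟨_, h⟩
        exact ⟨⟨hge, fun k' h1 h2 => h k' (by omega) h2⟩, h m (le_refl _) (by omega)⟩
      · rintro ⟨⟨_, h⟩, hm⟩
        refine ⟨by omega, ?_⟩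
        intro k' h1 h2
        rcases Nat.eq_or_lt_of_le h1 with h' | h'
        · subst h'; exact hm
        · exact h k' (by omega) h2
    exact Bool.coe_iff_coe.mp (by rw [hiff])
  rw [hcongr, List.singleton_append, List.map_cons]
  simp only [Int.ofNat_eq_natCast]

def rfmR (s : List Int) (m : Nat) : List Int :=
  (List.range s.length).map (fun i => if m ≤ i then pvScanR s (pvV s i) s.length (i + 1)
    else (s.length : Int))

theorem pvScanR_eq_head (s : List Int) (x : Int) (n m : Nat) (hmn : m < n) :
    pvScanR s x n (m + 1) = (match (pvStkR s n (m + 1)).filter (fun j => !decide (x ≤ pvGetS s j)) with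
      | [] => (n : Int) | j :: _ => j) :=
  isNextLT_unique s x m n _ _ (scanR_isNextLT s x m n hmn) (pvStkR_filter_head s x n m hmn)

theorem pvRightPass_inv (s : List Int) : ∀ t m, m + t = s.length →
    ((PySem.List.pyRange ((s.length : Int) - 1) ((m : Int) - 1) (-1)).foldl
        (fun (acc : List Int × List Int) i =>
          let st := pvPopGE s (pvGetS s i) acc.2
          let rt := match st with
            | [] => acc.1
            | j :: _ => PySem.List.pySetD acc.1 i j
          (rt, i :: st))
        (List.replicate s.length (s.length : Int), ([] : List Int))) =
      (rfmR s m, pvStkR s s.length m) := by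
  intro t
  induction t with
  | zero =>
    intro m hm
    have hm' : m = s.length := by omega
    subst hm'
    rw [PySem.List.pyRange_neg_one_eq_nil (by omega), List.foldl_nil]
    have h1 : rfmR s s.length = List.replicate s.length (s.length : Int) := by
      rw [rfmR, pvReplicate_eq_map]
      apply List.map_congr_left
      intro i hi
      rw [List.mem_range] at hi
      rw [if_neg (by omega)]
    have h2 : pvStkR s s.length s.length = [] := by
      rw [pvStkR]
      have : (List.range s.length).filter (pvKeepR s s.length) = [] := by
        rw [List.filter_eq_nil_iff]
        intro j hj
        rw [List.mem_range] at hj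
        rw [pvKeepR_iff]
        intro ⟨h, _⟩; omega
      rw [this]; rfl
    rw [h1, h2]
  | succ t ih =>
    intro m hm
    have hmn : m < s.length := by omega
    have hsplit : PySem.List.pyRange ((s.length : Int) - 1) ((m : Int) - 1) (-1)
        = PySem.List.pyRange ((s.length : Int) - 1) (((m + 1 : Nat) : Int) - 1) (-1) ++ [(m : Int)] := by
      rw [PySem.List.pyRange_neg_one_eq_reverse, PySem.List.pyRange_neg_one_eq_reverse]
      have e1 : (m : Int) - 1 + 1 = (m : Int) := by ring
      have e2 : (s.length : Int) - 1 + 1 = (s.length : Int) := by ring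
      have e3 : ((m + 1 : Nat) : Int) - 1 + 1 = (m : Int) + 1 := by push_cast; ring
      rw [e1, e2, e3, PySem.List.pyRange_one_cons (by exact_mod_cast hmn), List.reverse_cons]
    rw [hsplit, List.foldl_append, ih (m + 1) (by omega), List.foldl_cons, List.foldl_nil]
    have hpop : pvPopGE s (pvGetS s (m : Int)) (pvStkR s s.length (m + 1)) =
        (pvStkR s s.length (m + 1)).filter (fun j => !decide (pvV s m ≤ pvGetS s j)) := by
      rw [pvGetS_natCast, pvPopGE]; exact pvPopGE_stkR s (pvV s m) s.length (m + 1)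
    dsimp only
    rw [hpop]
    have hscan := pvScanR_eq_head s (pvV s m) s.length m hmn
    rcases hq : (pvStkR s s.length (m + 1)).filter (fun j => !decide (pvV s m ≤ pvGetS s j)) with _ | ⟨j, t0⟩
    · rw [hq] at hscan
      simp only [Prod.mk.injEq]
      constructor
      · rw [rfmR, rfmR]
        apply List.map_congr_left
        intro i hil
        rw [List.mem_range] at hil
        by_cases h : i = m
        · subst h
          rw [if_neg (by omega), if_pos (by omega)]
          exact hscan.symm
        · by_cases h2 : m + 1 ≤ i
          · rw [if_pos h2, if_pos (by omega)]
          · rw [if_neg h2, if_neg (by omega)]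
      · rw [pvStkR_succ s s.length m hmn, hq]
    · rw [hq] at hscan
      simp only [Prod.mk.injEq]
      constructor
      · rw [PySem.List.pySetD_natCast, rfmR, rfmR, pvSet_map_range]
        apply List.map_congr_left
        intro i hil
        rw [List.mem_range] at hil
        by_cases h : i = m
        · subst h
          rw [if_pos rfl, if_pos (by omega)]
          exact hscan.symm
        · rw [if_neg h]
          by_cases h2 : m + 1 ≤ i
          · rw [if_pos h2, if_pos (by omega)]
          · rw [if_neg h2, if_neg (by omega)]
      · rw [pvStkR_succ s s.length m hmn, hq]

theorem pvRightPass_getD (s : List Int) (i : Nat) (hi : i < s.length) :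
    pvGetS (pvRightPass s (PySem.List.len s)) (i : Int) = pvScanR s (pvV s i) s.length (i + 1) := by
  rw [pvRightPass]
  simp only [PySem.List.len_eq, Int.toNat_natCast]
  have h0 : (-1 : Int) = ((0 : Nat) : Int) - 1 := by norm_num
  nth_rewrite 1 [h0]
  rw [pvRightPass_inv s s.length 0 (by omega)]
  rw [pvGetS_natCast, rfmR, pvV_map_range _ _ _ hi, if_pos (by omega)]

def pvPreE (s : List Int) (k : Nat) : Int := (s.take k).sum

def pvPsE (s : List Int) : Nat → Int
  | 0 => 0
  | k + 1 => PySem.Int.mod (pvPsE s k + pvV s k) pvMod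

def pvPopE (s : List Int) : Nat → Int
  | 0 => 0
  | k + 1 => PySem.Int.mod (pvPopE s k + pvPsE s k) pvMod

def pvSPE (s : List Int) (k : Nat) : Int := ((List.range k).map (pvPreE s)).sum

theorem pvPrefixSum_inv (s : List Int) : ∀ m, m ≤ s.length →
    ((PySem.List.pyRange 0 (m : Int) 1).foldl (fun ps i =>
        PySem.List.pySetD ps (i + 1) (PySem.Int.mod (pvGetS ps i + pvGetS s i) pvMod))
      (List.replicate (s.length + 1) 0))
    = (List.range (s.length + 1)).map (fun k => if k ≤ m then pvPsE s k else 0) := by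
  intro m
  induction m with
  | zero =>
    intro _
    rw [PySem.List.pyRange_one_eq_nil (by norm_num), List.foldl_nil, pvReplicate_eq_map]
    apply List.map_congr_left
    intro k _
    by_cases h : k ≤ 0
    · rw [if_pos h]
      have : k = 0 := by omega
      subst this; rfl
    · rw [if_neg h]
  | succ m ih =>
    intro hm
    have h1 : ((m + 1 : Nat) : Int) = (m : Int) + 1 := by push_cast; ring
    rw [h1, PySem.List.pyRange_one_succ_right (by positivity), List.foldl_append,
      ih (by omega), List.foldl_cons, List.foldl_nil]
    have hget : pvGetS ((List.range (s.length + 1)).map (fun k => if k ≤ m then pvPsE s k else 0)) (m : Int)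
        = pvPsE s m := by
      rw [pvGetS_natCast, pvV_map_range _ _ _ (by omega), if_pos (le_refl m)]
    have hcast : (m : Int) + 1 = ((m + 1 : Nat) : Int) := by push_cast; ring
    rw [hget, pvGetS_natCast, hcast, PySem.List.pySetD_natCast, pvSet_map_range]
    apply List.map_congr_left
    intro k hk
    rw [List.mem_range] at hk
    by_cases h : k = m + 1
    · subst h
      rw [if_pos rfl, if_pos (le_refl _)]
      rfl
    · rw [if_neg h]
      by_cases h2 : k ≤ m
      · rw [if_pos h2, if_pos (by omega)]
      · rw [if_neg h2, if_neg (by omega)]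

theorem pvPrefixSum_getD (s : List Int) (z : Int) (h0 : 0 ≤ z) (h1 : z ≤ (s.length : Int)) :
    pvGetS (pvPrefixSum s (PySem.List.len s)) z = pvPsE s z.toNat := by
  rw [pvPrefixSum]
  simp only [PySem.List.len_eq, Int.toNat_natCast]
  rw [pvPrefixSum_inv s s.length (le_refl _)]
  have hz : z = ((z.toNat : Nat) : Int) := by omega
  rw [hz, pvGetS_natCast, pvV_map_range _ _ _ (by omega), if_pos (by omega), Int.toNat_natCast]

theorem pvPops_inv (s : List Int) (ps : List Int)
    (hps : ∀ k : Nat, k ≤ s.length → pvGetS ps (k : Int) = pvPsE s k) :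
    ∀ m, m ≤ s.length + 1 →
    ((PySem.List.pyRange 0 (m : Int) 1).foldl (fun pp i =>
        PySem.List.pySetD pp (i + 1) (PySem.Int.mod (pvGetS pp i + pvGetS ps i) pvMod))
      (List.replicate (s.length + 2) 0))
    = (List.range (s.length + 2)).map (fun k => if k ≤ m then pvPopE s k else 0) := by
  intro m
  induction m with
  | zero =>
    intro _
    rw [PySem.List.pyRange_one_eq_nil (by norm_num), List.foldl_nil, pvReplicate_eq_map]
    apply List.map_congr_left
    intro k _
    by_cases h : k ≤ 0
    · rw [if_pos h]
      have : k = 0 := by omega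
      subst this; rfl
    · rw [if_neg h]
  | succ m ih =>
    intro hm
    have h1 : ((m + 1 : Nat) : Int) = (m : Int) + 1 := by push_cast; ring
    rw [h1, PySem.List.pyRange_one_succ_right (by positivity), List.foldl_append,
      ih (by omega), List.foldl_cons, List.foldl_nil]
    have hget : pvGetS ((List.range (s.length + 2)).map (fun k => if k ≤ m then pvPopE s k else 0)) (m : Int)
        = pvPopE s m := by
      rw [pvGetS_natCast, pvV_map_range _ _ _ (by omega), if_pos (le_refl m)]
    have hcast : (m : Int) + 1 = ((m + 1 : Nat) : Int) := by push_cast; ring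
    rw [hget, hps m (by omega), hcast, PySem.List.pySetD_natCast, pvSet_map_range]
    apply List.map_congr_left
    intro k hk
    rw [List.mem_range] at hk
    by_cases h : k = m + 1
    · subst h
      rw [if_pos rfl, if_pos (le_refl _)]
      rfl
    · rw [if_neg h]
      by_cases h2 : k ≤ m
      · rw [if_pos h2, if_pos (by omega)]
      · rw [if_neg h2, if_neg (by omega)]

theorem pvPops_getD (s : List Int) (z : Int) (h0 : 0 ≤ z) (h1 : z ≤ (s.length : Int) + 1) :
    pvGetS (pvPops (pvPrefixSum s (PySem.List.len s)) (PySem.List.len s)) z = pvPopE s z.toNat := by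
  rw [pvPops]
  simp only [PySem.List.len_eq, Int.toNat_natCast]
  have hrange : ((s.length : Int) + 1) = (((s.length + 1 : Nat)) : Int) := by push_cast; ring
  rw [hrange, pvPops_inv s _ (fun k hk => by
      have h := pvPrefixSum_getD s (k : Int) (by omega) (by exact_mod_cast hk)
      rw [Int.toNat_natCast] at h
      simpa [PySem.List.len_eq] using h)
    (s.length + 1) (le_refl _)]
  have hz : z = ((z.toNat : Nat) : Int) := by omega
  rw [hz, pvGetS_natCast, pvV_map_range _ _ _ (by omega), if_pos (by omega), Int.toNat_natCast]

theorem pvPreE_succ (s : List Int) (k : Nat) (hk : k < s.length) :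
    pvPreE s (k + 1) = pvPreE s k + pvV s k := by
  rw [pvPreE, pvPreE, List.take_add_one, List.sum_append, pvV]
  rw [List.getElem?_eq_getElem hk]
  rw [List.getD_eq_getElem _ _ hk]
  simp

theorem pvPre_eq (s : List Int) : pvPre s = (List.range (s.length + 1)).map (pvPreE s) := by
  induction s using List.reverseRecOn with
  | nil => rfl
  | append_singleton s x ih =>
    rw [pvPre, List.foldl_append, List.foldl_cons, List.foldl_nil, ← pvPre, ih]
    have hlast : PySem.List.pyGetD ((List.range (s.length + 1)).map (pvPreE s)) (-1) 0 = pvPreE s s.length := by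
      rw [List.range_succ, List.map_append]
      exact PySem.List.pyGetD_neg_one_append_singleton _ _ _
    rw [hlast]
    have hr : List.map (pvPreE (s ++ [x])) (List.range ((s ++ [x]).length + 1))
        = List.map (pvPreE (s ++ [x])) (List.range (s.length + 1)) ++ [pvPreE (s ++ [x]) (s.length + 1)] := by
      rw [show (s ++ [x]).length + 1 = (s.length + 1) + 1 by simp, List.range_succ, List.map_append]
      simp only [List.map_cons, List.map_nil]
    rw [hr]
    congr 1
    · apply List.map_congr_left
      intro k hk
      rw [List.mem_range] at hk
      rw [pvPreE, pvPreE, List.take_append_of_le_length (by omega)]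
    · have h1 : pvPreE (s ++ [x]) (s.length + 1) = s.sum + x := by
        rw [pvPreE, List.take_of_length_le (by simp), List.sum_append]; simp
      have h2 : pvPreE s s.length = s.sum := by
        rw [pvPreE, List.take_of_length_le (by omega)]
      rw [h1, h2]

theorem pvPre_getD (s : List Int) (z : Int) (h0 : 0 ≤ z) (h1 : z ≤ (s.length : Int)) :
    pvGetS (pvPre s) z = pvPreE s z.toNat := by
  rw [pvPre_eq]
  have hz : z = ((z.toNat : Nat) : Int) := by omega
  rw [hz, pvGetS_natCast, pvV_map_range _ _ _ (by omega), Int.toNat_natCast]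

theorem pvModeq_mod (a : Int) : Int.ModEq pvMod (PySem.Int.mod a pvMod) a := by
  rw [PySem.Int.mod_eq_emod_of_pos (by norm_num [pvMod])]
  exact Int.emod_emod_of_dvd a dvd_rfl

theorem pvModeq_addp (a : Int) : Int.ModEq pvMod (a + pvMod) a := by
  show (a + pvMod) % pvMod = a % pvMod
  rw [show a + pvMod = a + pvMod * 1 by ring, Int.add_mul_emod_self_left]

theorem pvPsE_modeq (s : List Int) : ∀ k, k ≤ s.length → Int.ModEq pvMod (pvPsE s k) (pvPreE s k) := by
  intro k
  induction k with
  | zero => intro _; rfl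
  | succ k ih =>
    intro hk
    rw [pvPsE, pvPreE_succ s k (by omega)]
    exact (pvModeq_mod _).trans ((ih (by omega)).add (Int.ModEq.refl _))

theorem pvSPE_succ (s : List Int) (k : Nat) : pvSPE s (k + 1) = pvSPE s k + pvPreE s k := by
  rw [pvSPE, pvSPE, List.range_succ, List.map_append, List.sum_append]; simp

theorem pvPopE_modeq (s : List Int) : ∀ k, k ≤ s.length + 1 → Int.ModEq pvMod (pvPopE s k) (pvSPE s k) := by
  intro k
  induction k with
  | zero => intro _; rfl
  | succ k ih =>
    intro hk
    rw [pvPopE, pvSPE_succ]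
    exact (pvModeq_mod _).trans ((ih (by omega)).add (pvPsE_modeq s k (by omega)))

theorem pvSum_shift (g : Int → Int) (a b : Int) :
    ((PySem.List.pyRange a b 1).map (fun r => g (r + 1))).sum
      = ((PySem.List.pyRange (a + 1) (b + 1) 1).map g).sum := by
  rw [PySem.List.pyRange_one, PySem.List.pyRange_one, show b + 1 - (a + 1) = b - a by ring,
    List.map_map, List.map_map]
  congr 1
  apply List.map_congr_left
  intro k _
  simp only [Function.comp_apply]
  congr 1
  ring

theorem pvSum_preE_range (s : List Int) : ∀ b a : Nat, a ≤ b →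
    ((PySem.List.pyRange (a : Int) (b : Int) 1).map (fun z => pvPreE s z.toNat)).sum
      = pvSPE s b - pvSPE s a := by
  intro b
  induction b with
  | zero =>
    intro a ha
    have : a = 0 := by omega
    subst this
    rw [PySem.List.pyRange_one_eq_nil (by omega)]
    simp
  | succ b ih =>
    intro a ha
    by_cases hab : a = b + 1
    · subst hab
      rw [PySem.List.pyRange_one_eq_nil (by omega)]
      simp
    · have hab' : a ≤ b := by omega
      rw [show ((b + 1 : Nat) : Int) = (b : Int) + 1 by push_cast; ring,
        PySem.List.pyRange_one_succ_right (by exact_mod_cast hab'), List.map_append,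
        List.sum_append, ih a hab', pvSPE_succ]
      simp only [List.map_cons, List.map_nil, List.sum_cons, List.sum_nil, Int.toNat_natCast]
      ring

theorem pvSum_sub_const (f : Int → Int) (c : Int) : ∀ lst : List Int,
    (lst.map (fun r => f r - c)).sum = (lst.map f).sum - (lst.length : Int) * c := by
  intro lst
  induction lst with
  | nil => simp
  | cons a t ih =>
    simp only [List.map_cons, List.sum_cons, List.length_cons, ih]
    push_cast
    ring

theorem pvSum_const_sub (C c : Int) (g : Int → Int) : ∀ lst : List Int,
    (lst.map (fun l => C - c * g l)).sum = (lst.length : Int) * C - c * (lst.map g).sum := by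
  intro lst
  induction lst with
  | nil => simp
  | cons a t ih =>
    simp only [List.map_cons, List.sum_cons, List.length_cons, ih]
    push_cast
    ring

def pvBox (s : List Int) (i : Nat) : Int :=
  ((PySem.List.pyRange (pvScanL s (pvV s i) i + 1) ((i : Int) + 1) 1).map (fun l =>
     ((PySem.List.pyRange (i : Int) (pvScanR s (pvV s i) s.length (i + 1)) 1).map (fun r =>
        pvPreE s (r + 1).toNat - pvPreE s l.toNat)).sum)).sum

theorem pvBox_closed (s : List Int) (i Ln Rn : Nat)
    (hL : pvScanL s (pvV s i) i + 1 = (Ln : Int)) (hLle : Ln ≤ i)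
    (hR : pvScanR s (pvV s i) s.length (i + 1) = (Rn : Int)) (hRgt : i < Rn) :
    pvBox s i = ((i : Int) + 1 - (Ln : Int)) * (pvSPE s (Rn + 1) - pvSPE s (i + 1))
      - ((Rn : Int) - (i : Int)) * (pvSPE s (i + 1) - pvSPE s Ln) := by
  rw [pvBox, hL, hR]
  have hinner : ∀ l : Int, ((PySem.List.pyRange (i : Int) (Rn : Int) 1).map (fun r =>
      pvPreE s (r + 1).toNat - pvPreE s l.toNat)).sum
      = (pvSPE s (Rn + 1) - pvSPE s (i + 1)) - ((Rn : Int) - (i : Int)) * pvPreE s l.toNat := by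
    intro l
    rw [pvSum_sub_const (fun r => pvPreE s (r + 1).toNat) (pvPreE s l.toNat)]
    rw [pvSum_shift (fun z => pvPreE s z.toNat) (i : Int) (Rn : Int)]
    rw [show ((i : Int) + 1) = ((i + 1 : Nat) : Int) by push_cast; ring,
      show ((Rn : Int) + 1) = ((Rn + 1 : Nat) : Int) by push_cast; ring,
      pvSum_preE_range s (Rn + 1) (i + 1) (by omega), PySem.List.length_pyRange_one]
    have : (((Rn : Int) - (i : Int)).toNat : Int) = (Rn : Int) - (i : Int) := by omega
    rw [this]
  have houter : ((PySem.List.pyRange (Ln : Int) ((i : Int) + 1) 1).map (fun l =>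
      ((PySem.List.pyRange (i : Int) (Rn : Int) 1).map (fun r =>
        pvPreE s (r + 1).toNat - pvPreE s l.toNat)).sum)).sum
      = ((PySem.List.pyRange (Ln : Int) ((i : Int) + 1) 1).map (fun l =>
        (pvSPE s (Rn + 1) - pvSPE s (i + 1)) - ((Rn : Int) - (i : Int)) * pvPreE s l.toNat)).sum := by
    congr 1
    apply List.map_congr_left
    intro l _
    exact hinner l
  rw [houter, pvSum_const_sub (pvSPE s (Rn + 1) - pvSPE s (i + 1)) ((Rn : Int) - (i : Int))
    (fun l => pvPreE s l.toNat), PySem.List.length_pyRange_one]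
  rw [show ((i : Int) + 1) = ((i + 1 : Nat) : Int) by push_cast; ring,
    pvSum_preE_range s (i + 1) Ln (by omega)]
  have : ((((i + 1 : Nat) : Int) - (Ln : Int)).toNat : Int) = ((i + 1 : Nat) : Int) - (Ln : Int) := by omega
  rw [this]

def pvExact (s : List Int) (i : Nat) : Int := pvV s i * pvBox s i

def pvTot (s : List Int) (m : Nat) : Int := ((List.range m).map (pvExact s)).sum

theorem pvAlt_eq (s : List Int) : totalStrength_alt s = PySem.Int.mod (pvTot s s.length) pvMod := by
  rw [totalStrength_alt]
  dsimp only
  congr 1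
  rw [PySem.List.foldl_add, zero_add, PySem.List.pyRange_one, List.map_map]
  rw [show ((s.length : Int) - 0).toNat = s.length by omega]
  rw [pvTot]
  congr 1
  apply List.map_congr_left
  intro k hk
  rw [List.mem_range] at hk
  simp only [Function.comp_apply, zero_add, pvGetS_natCast, Int.toNat_natCast]
  rw [pvExact]
  congr 1
  -- inner folds to pvBox
  obtain ⟨hL1, hL2, _, _⟩ := scanL_isPrevLE s (pvV s k) k
  obtain ⟨hR1, hR2, _, _⟩ := scanR_isNextLT s (pvV s k) k s.length hk
  have hstep : ∀ (acc l : Int), l ∈ PySem.List.pyRange (pvScanL s (pvV s k) k + 1) ((k : Int) + 1) 1 →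
      (PySem.List.pyRange (k : Int) (pvScanR s (pvV s k) s.length (k + 1)) 1).foldl (fun acc2 r =>
          acc2 + (pvGetS (pvPre s) (r + 1) - pvGetS (pvPre s) l)) acc
        = acc + ((PySem.List.pyRange (k : Int) (pvScanR s (pvV s k) s.length (k + 1)) 1).map (fun r =>
            pvPreE s (r + 1).toNat - pvPreE s l.toNat)).sum := by
    intro acc l hl
    rw [PySem.List.foldl_add]
    congr 1
    congr 1
    apply List.map_congr_left
    intro r hr
    rw [PySem.List.mem_pyRange_one] at hl hr
    rw [pvPre_getD s (r + 1) (by omega) (by omega), pvPre_getD s l (by omega) (by omega)]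
  refine Eq.trans (PySem.List.foldl_congr_mem _ _ _ 0 hstep) ?_
  rw [PySem.List.foldl_add, zero_add, pvBox]

def pvTermA (s : List Int) (i : Int) : Int :=
  let n := PySem.List.len s
  let left := pvLeftPass s n
  let right := pvRightPass s n
  let ps := pvPrefixSum s n
  let pp := pvPops ps n
  let leftBound := pvGetS left i + 1
  let rightBound := pvGetS right i - 1
  let countLeft := i - leftBound + 1
  let countRight := rightBound - i + 1
  let sumPrefixRight := PySem.Int.mod (pvGetS pp (rightBound + 2) - pvGetS pp (i + 1) + pvMod) pvMod
  let sumPrefixLeft := PySem.Int.mod (pvGetS pp (i + 1) - pvGetS pp leftBound + pvMod) pvMod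
  let positiveTerm := PySem.Int.mod (countLeft * sumPrefixRight) pvMod
  let negativeTerm := PySem.Int.mod (countRight * sumPrefixLeft) pvMod
  let sumOfSubarraySums := PySem.Int.mod (positiveTerm - negativeTerm + pvMod) pvMod
  PySem.Int.mod (pvGetS s i * sumOfSubarraySums) pvMod

theorem pvTermA_modeq (s : List Int) (m : Nat) (hm : m < s.length) :
    Int.ModEq pvMod (pvTermA s (m : Int)) (pvExact s m) := by
  obtain ⟨hL1, hL2, _, _⟩ := scanL_isPrevLE s (pvV s m) m
  obtain ⟨hR1, hR2, _, _⟩ := scanR_isNextLT s (pvV s m) m s.length hm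
  simp only [pvTermA]
  rw [pvLeftPass_getD s m hm, pvRightPass_getD s m hm]
  set L := pvScanL s (pvV s m) m with hLdef
  set R := pvScanR s (pvV s m) s.length (m + 1) with hRdef
  have hLn : L + 1 = ((L + 1).toNat : Int) := by omega
  have hRn : R = (R.toNat : Int) := by omega
  set Ln := (L + 1).toNat
  set Rn := R.toNat
  rw [show R - 1 + 2 = R + 1 by ring]
  rw [pvPops_getD s (R + 1) (by omega) (by omega),
    pvPops_getD s ((m : Int) + 1) (by omega) (by omega),
    pvPops_getD s (L + 1) (by omega) (by omega)]
  rw [show (R + 1).toNat = Rn + 1 by omega, show ((m : Int) + 1).toNat = m + 1 by omega,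
    show (L + 1).toNat = Ln from rfl]
  have hX : Int.ModEq pvMod
      (PySem.Int.mod (pvPopE s (Rn + 1) - pvPopE s (m + 1) + pvMod) pvMod)
      (pvSPE s (Rn + 1) - pvSPE s (m + 1)) :=
    (pvModeq_mod _).trans ((pvModeq_addp _).trans
      ((pvPopE_modeq s (Rn + 1) (by omega)).sub (pvPopE_modeq s (m + 1) (by omega))))
  have hY : Int.ModEq pvMod
      (PySem.Int.mod (pvPopE s (m + 1) - pvPopE s Ln + pvMod) pvMod)
      (pvSPE s (m + 1) - pvSPE s Ln) :=
    (pvModeq_mod _).trans ((pvModeq_addp _).trans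
      ((pvPopE_modeq s (m + 1) (by omega)).sub (pvPopE_modeq s Ln (by omega))))
  have hP : Int.ModEq pvMod
      (PySem.Int.mod (((m : Int) - (L + 1) + 1) *
        PySem.Int.mod (pvPopE s (Rn + 1) - pvPopE s (m + 1) + pvMod) pvMod) pvMod)
      (((m : Int) - (L + 1) + 1) * (pvSPE s (Rn + 1) - pvSPE s (m + 1))) :=
    (pvModeq_mod _).trans ((Int.ModEq.refl _).mul hX)
  have hN : Int.ModEq pvMod
      (PySem.Int.mod ((R - 1 - (m : Int) + 1) *
        PySem.Int.mod (pvPopE s (m + 1) - pvPopE s Ln + pvMod) pvMod) pvMod)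
      ((R - 1 - (m : Int) + 1) * (pvSPE s (m + 1) - pvSPE s Ln)) :=
    (pvModeq_mod _).trans ((Int.ModEq.refl _).mul hY)
  have hS := (pvModeq_mod _).trans ((pvModeq_addp _).trans (hP.sub hN))
  refine ((pvModeq_mod _).trans ((Int.ModEq.refl (pvGetS s (m : Int))).mul hS)).trans ?_
  have heq : pvGetS s (m : Int) *
      (((m : Int) - (L + 1) + 1) * (pvSPE s (Rn + 1) - pvSPE s (m + 1)) -
        (R - 1 - (m : Int) + 1) * (pvSPE s (m + 1) - pvSPE s Ln)) = pvExact s m := by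
    rw [pvExact, pvBox_closed s m Ln Rn (hLdef ▸ hLn) (by omega) (hRdef ▸ hRn) (by omega),
      pvGetS_natCast]
    rw [show (m : Int) - (L + 1) + 1 = (m : Int) + 1 - (Ln : Int) by omega,
      show R - 1 - (m : Int) + 1 = (Rn : Int) - (m : Int) by omega]
  rw [heq]

def pvStepA (s : List Int) (total i : Int) : Int :=
  PySem.Int.mod (total + pvTermA s i) pvMod

theorem pvTot_succ (s : List Int) (m : Nat) : pvTot s (m + 1) = pvTot s m + pvExact s m := by
  rw [pvTot, pvTot, List.range_succ, List.map_append, List.sum_append]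
  simp

theorem pvALoop (s : List Int) : ∀ m, m ≤ s.length →
    0 ≤ ((PySem.List.pyRange 0 (m : Int) 1).foldl (pvStepA s) 0) ∧
    ((PySem.List.pyRange 0 (m : Int) 1).foldl (pvStepA s) 0) < pvMod ∧
    Int.ModEq pvMod ((PySem.List.pyRange 0 (m : Int) 1).foldl (pvStepA s) 0) (pvTot s m) := by
  intro m
  induction m with
  | zero =>
    intro _
    rw [PySem.List.pyRange_one_eq_nil (by norm_num), List.foldl_nil]
    exact ⟨le_refl _, by norm_num [pvMod], by rfl⟩
  | succ m ih =>
    intro hm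
    obtain ⟨ih1, ih2, ih3⟩ := ih (by omega)
    have h1 : ((m + 1 : Nat) : Int) = (m : Int) + 1 := by push_cast; ring
    rw [h1, PySem.List.pyRange_one_succ_right (by positivity), List.foldl_append,
      List.foldl_cons, List.foldl_nil]
    refine ⟨PySem.Int.mod_nonneg _ (by norm_num [pvMod]), PySem.Int.mod_lt _ (by norm_num [pvMod]), ?_⟩
    rw [pvStepA, pvTot_succ]
    exact (pvModeq_mod _).trans (ih3.add (pvTermA_modeq s m (by omega)))

theorem pvA_eq_fold (s : List Int) :
    totalStrength s = (PySem.List.pyRange 0 ((s.length : Nat) : Int) 1).foldl (pvStepA s) 0 := rfl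

theorem pvMain (s : List Int) : totalStrength s = totalStrength_alt s := by
  rw [pvA_eq_fold, pvAlt_eq]
  obtain ⟨h1, h2, h3⟩ := pvALoop s s.length (le_refl _)
  rw [PySem.Int.mod_eq_emod_of_pos (by norm_num [pvMod])]
  rw [← h3]
  exact (Int.emod_eq_of_lt h1 h2).symm

-- ===== VERDICT (by name: the statement is the Claim_ definition above) =====
theorem totalStrength_spec : Claim_equal_totalStrength := by
  intro strength _
  exact pvMain strength
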